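-- pv_equiv track=rewrite | github.com/mruduladevaguptapu2000/Operarioai | api/agent/tools/sqlite_batch.py | _fix_trailing_commas
-- ===== SOURCE A (Python) =====
-- def _fix_trailing_commas(sql: str) -> tuple[str, str | None]:
--     """Fix trailing commas before closing parentheses.
--
--     Example: VALUES (1, 2, 3,) -> VALUES (1, 2, 3)
--     This is a common LLM mistake in multi-row INSERT statements.
--     """
--     # Pattern: comma followed by optional whitespace then closing paren
--     # But only outside of string literals
--     original = sql
--     result = []
--     i = 0
--     in_string = False
--     string_char = None
--
--     while i < len(sql):
--         char = sql[i]
--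
--         if in_string:
--             result.append(char)
--             if char == string_char:
--                 # Check for escaped quote (doubled)
--                 if i + 1 < len(sql) and sql[i + 1] == string_char:
--                     i += 1
--                     result.append(sql[i])
--                 else:
--                     in_string = False
--         else:
--             if char in ("'", '"'):
--                 in_string = True
--                 string_char = char
--                 result.append(char)
--             elif char == ',':
--                 # Look ahead for optional whitespace then ')'
--                 j = i + 1
--                 while j < len(sql) and sql[j] in ' \t\n\r':
--                     j += 1
--                 if j < len(sql) and sql[j] == ')':
--                     # Skip this comma (don't append it)
--                     pass
--                 else:
--                     result.append(char)
--             else: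
--                 result.append(char)
--         i += 1
--
--     fixed = ''.join(result)
--     if fixed != original:
--         return fixed, "removed trailing comma before ')'"
--     return sql, None
-- ===== SOURCE B (Python) =====
-- def _fix_trailing_commas(sql: str) -> tuple[str, str | None]:
--     n = len(sql)
--     ws = ' \t\n\r'
--     # pass 1: mark the positions that lie inside a string literal
--     mask = [False] * n
--     in_str = False
--     q = None
--     i = 0
--     while i < n:
--         c = sql[i]
--         if in_str:
--             mask[i] = True
--             if c == q:
--                 if i + 1 < n and sql[i + 1] == q:
--                     mask[i + 1] = True
--                     i += 1
--                 else:
--                     in_str = False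
--         elif c in "'\"":
--             in_str = True
--             q = c
--             mask[i] = True
--         i += 1
--     # pass 2 (right to left): closes[i] iff from i, whitespace leads to ')'
--     closes = [False] * (n + 1)
--     for i in range(n - 1, -1, -1):
--         if sql[i] == ')':
--             closes[i] = True
--         elif sql[i] in ws:
--             closes[i] = closes[i + 1]
--     # pass 3: keep every char except an outside-string comma whose ws-run ends in ')'
--     fixed = ''.join(c for i, c in enumerate(sql)
--                     if not (c == ',' and not mask[i] and closes[i + 1]))
--     if fixed != sql:
--         return fixed, "removed trailing comma before ')'"
--     return sql, None
-- ===== Notes on version B (the rewrite author's own statement) =====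
-- stated objective: alternative
-- what changed: Replaced A's single interleaved scan with per-comma forward whitespace rescans by three independent linear passes: an inside-string mask, a right-to-left closes array marking whitespace runs that end at a closing paren, and one filtering pass, eliminating the inner lookahead loop.
import Mathlib
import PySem

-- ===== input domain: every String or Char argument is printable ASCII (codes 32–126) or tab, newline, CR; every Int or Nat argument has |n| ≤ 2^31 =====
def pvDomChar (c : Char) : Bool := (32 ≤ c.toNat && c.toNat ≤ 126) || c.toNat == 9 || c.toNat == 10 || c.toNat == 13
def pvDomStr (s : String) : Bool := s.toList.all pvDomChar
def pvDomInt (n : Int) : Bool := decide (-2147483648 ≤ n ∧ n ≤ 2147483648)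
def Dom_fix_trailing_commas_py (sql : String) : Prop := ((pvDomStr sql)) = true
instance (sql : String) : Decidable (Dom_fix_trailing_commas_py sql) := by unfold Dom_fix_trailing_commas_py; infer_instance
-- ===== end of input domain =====

-- B removes A's inner per-comma whitespace rescan by three independent linear passes
-- (inside-string mask, right-to-left closes array, one filter pass); same return value.

def pvIsWs (c : Char) : Bool := c = ' ' || c = '\t' || c = '\n' || c = '\r'

-- ===== PORT A =====
-- the j-loop: skip whitespace, then test whether the next char is ')'
def pvLookClose : List Char → Bool
  | [] => false
  | c :: rest => if pvIsWs c then pvLookClose rest else c = ')'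

-- A's while loop; acc holds the appended chars in reverse (Python's result list)
def pvALoop : List Char → Bool → Option Char → List Char → List Char
  | [], _, _, acc => acc.reverse
  | c :: rest, inStr, sc, acc =>
    if inStr then
      if some c = sc then
        match _hr : rest with
        | c2 :: rest2 =>
          if some c2 = sc then pvALoop rest2 inStr sc (c2 :: c :: acc)
          else pvALoop rest false sc (c :: acc)
        | [] => pvALoop [] false sc (c :: acc)
      else pvALoop rest inStr sc (c :: acc)
    else
      if c = '\'' ∨ c = '"' then pvALoop rest true (some c) (c :: acc)
      else if c = ',' then
        if pvLookClose rest then pvALoop rest inStr sc acc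
        else pvALoop rest inStr sc (c :: acc)
      else pvALoop rest inStr sc (c :: acc)
termination_by cs _ _ _ => cs.length
decreasing_by all_goals (subst_vars; simp only [List.length_cons]; omega)

def fix_trailing_commas_py (sql : String) : String × Option String :=
  let fixed := String.ofList (pvALoop sql.toList false none [])
  if fixed ≠ sql then (fixed, some "removed trailing comma before ')'")
  else (sql, none)

-- ===== PORT B =====
-- pass 1: inside-string mask (one Bool per char)
def pvMask : List Char → Bool → Option Char → List Bool
  | [], _, _ => []
  | c :: rest, inStr, q =>
    if inStr then
      if some c = q then
        match _hr : rest with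
        | c2 :: rest2 =>
          if some c2 = q then true :: true :: pvMask rest2 true q
          else true :: pvMask rest false q
        | [] => [true]
      else true :: pvMask rest true q
    else
      if c = '\'' ∨ c = '"' then true :: pvMask rest true (some c)
      else false :: pvMask rest false q
termination_by cs _ _ => cs.length
decreasing_by all_goals (subst_vars; simp only [List.length_cons]; omega)

-- pass 2 (right to left): closes[i] iff from i whitespace leads to ')'; length n+1, last entry false
def pvCloses : List Char → List Bool
  | [] => [false]
  | c :: rest =>
    let t := pvCloses rest
    (if c = ')' then true else if pvIsWs c then t.headD false else false) :: t

-- pass 3: keep every char except an outside-string comma whose ws-run ends in ')'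
def pvCombine : List Char → List Bool → List Bool → List Char
  | c :: cs, m :: ms, b :: bs =>
    if c = ',' ∧ m = false ∧ b = true then pvCombine cs ms bs
    else c :: pvCombine cs ms bs
  | cs, _, _ => cs

def fix_trailing_commas_py_alt (sql : String) : String × Option String :=
  let cs := sql.toList
  let fixed := String.ofList (pvCombine cs (pvMask cs false none) ((pvCloses cs).tail))
  if fixed ≠ sql then (fixed, some "removed trailing comma before ')'")
  else (sql, none)

-- ===== PRECONDITION & SPEC =====
def Spec_fix_trailing_commas_py (sql : String) (out : String × Option String) : Prop := out = fix_trailing_commas_py_alt sql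
instance (sql : String) (out : String × Option String) : Decidable (Spec_fix_trailing_commas_py sql out) := by unfold Spec_fix_trailing_commas_py; infer_instance

-- ===== CLAIM (what is proved, stated in full; the proofs are below) =====
def Claim_equal_fix_trailing_commas_py : Prop := ∀ (sql : String), Dom_fix_trailing_commas_py sql → Spec_fix_trailing_commas_py sql (fix_trailing_commas_py sql)

-- ===== LEMMAS AND PROOFS =====

-- pvCloses always returns a nonempty list whose head is pvLookClose
theorem pvCloses_eq (cs : List Char) :
    pvCloses cs = pvLookClose cs :: (pvCloses cs).tail := by
  induction cs with
  | nil => simp [pvCloses, pvLookClose]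
  | cons c rest ih =>
    simp only [pvCloses, pvLookClose]
    by_cases h : pvIsWs c
    · have hc : c ≠ ')' := by
        intro hc; subst hc; simp [pvIsWs] at h
      simp [h, hc]
      conv_lhs => rw [ih]
      simp
    · by_cases hp : c = ')'
      · subst hp; simp [pvIsWs]
      · simp [h, hp]

-- tail of pvCloses drops one position
theorem pvCloses_tail (c : Char) (cs : List Char) :
    (pvCloses (c :: cs)).tail = pvCloses cs := by
  simp [pvCloses]

-- the core loop equivalence, generalizing the state
theorem pvALoop_eq (cs : List Char) (inStr : Bool) (q : Option Char) (acc : List Char) :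
    pvALoop cs inStr q acc
      = acc.reverse ++ pvCombine cs (pvMask cs inStr q) ((pvCloses cs).tail) := by
  fun_induction pvALoop cs inStr q acc with
  | case1 _ _ acc => simp [pvCombine, pvCloses]
  | case2 c acc c2 rest2 h ih =>
    have hc2 : c2 = c := Option.some.inj h
    subst hc2
    rw [ih, pvCloses_tail c2 (c2 :: rest2), pvCloses_eq (c2 :: rest2),
        pvCloses_tail c2 rest2, pvCloses_eq rest2]
    conv_rhs => rw [pvMask.eq_def]
    simp [pvCombine]
  | case3 c acc c2 rest2 h ih =>
    rw [ih, pvCloses_tail c (c2 :: rest2), pvCloses_eq (c2 :: rest2)]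
    conv_rhs => rw [pvMask.eq_def]
    simp [pvCombine, h]
  | case4 c acc ih =>
    rw [ih]
    conv_rhs => rw [pvMask.eq_def]
    simp [pvCombine, pvCloses]
  | case5 c rest sc acc h ih =>
    rw [ih, pvCloses_tail c rest, pvCloses_eq rest]
    conv_rhs => rw [pvMask.eq_def]
    simp [pvCombine, h]
  | case6 c rest inStr sc acc hni hq ih =>
    have hI : inStr = false := by simpa using hni
    subst hI
    have hc : c ≠ ',' := by rcases hq with h | h <;> subst h <;> decide
    rw [ih, pvCloses_tail c rest, pvCloses_eq rest]
    conv_rhs => rw [pvMask.eq_def]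
    simp [pvCombine, hq, hc]
  | case7 rest inStr sc acc hni hlook hq ih =>
    have hI : inStr = false := by simpa using hni
    subst hI
    rw [ih, pvCloses_tail ',' rest, pvCloses_eq rest]
    conv_rhs => rw [pvMask.eq_def]
    simp [pvCombine, hlook]
  | case8 rest inStr sc acc hni hlook hq ih =>
    have hI : inStr = false := by simpa using hni
    subst hI
    have hl : pvLookClose rest = false := by simpa using hlook
    rw [ih, pvCloses_tail ',' rest, pvCloses_eq rest]
    conv_rhs => rw [pvMask.eq_def]
    simp [pvCombine, hl]
  | case9 c rest inStr sc acc hni hq hc ih =>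
    have hI : inStr = false := by simpa using hni
    subst hI
    rw [ih, pvCloses_tail c rest, pvCloses_eq rest]
    conv_rhs => rw [pvMask.eq_def]
    simp [pvCombine, hq, hc]

-- ===== VERDICT (by name: the statement is the Claim_ definition above) =====
theorem fix_trailing_commas_py_spec : Claim_equal_fix_trailing_commas_py := by
  intro sql _
  show _ = _
  unfold fix_trailing_commas_py fix_trailing_commas_py_alt
  rw [pvALoop_eq]
  simp
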